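-- pv_equiv track=rewrite | github.com/sriramkv3010/NAFO | p5_analysis/aoi_analysis.py | compute_aoi
-- ===== SOURCE A (Python) =====
-- def compute_aoi(admission_pattern: list) -> list:
--     """
--     Compute AoI per round given admission pattern.
--     AoI_i(t) = t - t_last_admitted
--     AoI = 0 if admitted this round.
--     """
--     aoi = []
--     last_admitted = -1
--     for t, admitted in enumerate(admission_pattern):
--         if admitted:
--             last_admitted = t
--             aoi.append(0)
--         else:
--             if last_admitted == -1:
--                 aoi.append(t + 1)
--             else:
--                 aoi.append(t - last_admitted)
--     return aoi
-- ===== SOURCE B (Python) =====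
-- def compute_aoi(admission_pattern: list) -> list:
--     """Segment emission: collect admitted indices, then emit one arithmetic run
--     per segment — range(1, first+1) before the first admission (or the whole
--     output if none), and range(0, next_boundary - admit) from each admission to
--     the next (the list end acting as the final boundary)."""
--     n = len(admission_pattern)
--     admits = [i for i, a in enumerate(admission_pattern) if a]
--     if not admits:
--         return list(range(1, n + 1))
--     out = list(range(1, admits[0] + 1))
--     for prev, nxt in zip(admits, admits[1:] + [n]):
--         out.extend(range(0, nxt - prev))
--     return out
-- ===== Notes on version B (the rewrite author's own statement) =====
-- stated objective: alternative
-- what changed: Replaces A's per-element loop carrying last_admitted by a two-stage segment construction: first collect the admitted indices, then emit one arithmetic run (range) per segment between consecutive boundaries.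
import Mathlib
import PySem

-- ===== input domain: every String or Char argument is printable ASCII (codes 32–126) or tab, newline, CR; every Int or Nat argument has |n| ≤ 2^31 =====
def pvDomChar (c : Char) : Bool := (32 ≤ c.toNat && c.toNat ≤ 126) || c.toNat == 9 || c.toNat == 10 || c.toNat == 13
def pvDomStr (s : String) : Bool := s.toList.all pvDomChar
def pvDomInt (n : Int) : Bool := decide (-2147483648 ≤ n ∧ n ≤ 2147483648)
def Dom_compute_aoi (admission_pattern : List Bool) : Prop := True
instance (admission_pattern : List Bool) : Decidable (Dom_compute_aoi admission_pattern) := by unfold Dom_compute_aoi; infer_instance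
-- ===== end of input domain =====

-- B replaces A's element-by-element loop by a segment construction: it first extracts the
-- admitted indices, then emits one arithmetic run (range) per segment; objective: alternative.

-- ===== PORT A =====
-- loop over enumerate(admission_pattern) carrying the output list and last_admitted
def pvAoiLoopA (l : List Bool) (t : Int) (last_admitted : Int) : List Int :=
  match l with
  | [] => []
  | admitted :: rest =>
    if admitted then
      0 :: pvAoiLoopA rest (t + 1) t
    else
      if last_admitted == -1 then
        (t + 1) :: pvAoiLoopA rest (t + 1) last_admitted
      else
        (t - last_admitted) :: pvAoiLoopA rest (t + 1) last_admitted

def compute_aoi (admission_pattern : List Bool) : List Int :=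
  pvAoiLoopA admission_pattern 0 (-1)

-- ===== PORT B =====
-- admits = [i for i, a in enumerate(admission_pattern) if a]
def pvAdm (p : List Bool) : List Int :=
  ((PySem.List.enumerate p).filter (fun x => x.2)).map (fun x => x.1)

def compute_aoi_alt (admission_pattern : List Bool) : List Int :=
  let n : Int := admission_pattern.length
  let admits : List Int := pvAdm admission_pattern
  match admits with
  | [] => PySem.List.pyRange 1 (n + 1) 1
  | a0 :: _ =>
    (admits.zip (admits.tail ++ [n])).foldl
      (fun acc pr => acc ++ PySem.List.pyRange 0 (pr.2 - pr.1) 1)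
      (PySem.List.pyRange 1 (a0 + 1) 1)

-- ===== PRECONDITION & SPEC =====
def Spec_compute_aoi (admission_pattern : List Bool) (out : List Int) : Prop := out = compute_aoi_alt admission_pattern
instance (admission_pattern : List Bool) (out : List Int) : Decidable (Spec_compute_aoi admission_pattern out) := by unfold Spec_compute_aoi; infer_instance

-- ===== CLAIM (what is proved, stated in full; the proofs are below) =====
def Claim_equal_compute_aoi : Prop := ∀ (admission_pattern : List Bool), Dom_compute_aoi admission_pattern → Spec_compute_aoi admission_pattern (compute_aoi admission_pattern)

-- ===== LEMMAS AND PROOFS =====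

-- running-age loop: proof-side intermediate between A's (t, last) state and B's segments
def pvAge (l : List Bool) (age : Int) : List Int :=
  match l with
  | [] => []
  | admitted :: rest =>
    let age' : Int := if admitted then 0 else age + 1
    age' :: pvAge rest age'

-- flat segment body: one range per (admit, next boundary) pair
def pvSeg (xs : List Int) (n : Int) : List Int :=
  (xs.zip (xs.tail ++ [n])).flatMap (fun pr => PySem.List.pyRange 0 (pr.2 - pr.1) 1)

-- B's output described structurally (match on the admits list), with a shifted first segment
def pvOut (p : List Bool) (d : Int) : List Int :=
  match pvAdm p with
  | [] => PySem.List.pyRange (d + 1) (d + 1 + p.length) 1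
  | a0 :: _ => PySem.List.pyRange (d + 1) (d + 1 + a0) 1 ++ pvSeg (pvAdm p) p.length

theorem pvEnumerate_shift {α : Type} (xs : List α) (s : Int) :
    PySem.List.enumerate xs (s + 1) =
      (PySem.List.enumerate xs s).map (fun x => (x.1 + 1, x.2)) := by
  induction xs generalizing s with
  | nil => rfl
  | cons a q ih => simp [PySem.List.enumerate_cons, ih]

theorem pvAdm_cons (a : Bool) (q : List Bool) :
    pvAdm (a :: q) =
      if a then 0 :: (pvAdm q).map (· + 1) else (pvAdm q).map (· + 1) := by
  unfold pvAdm
  rw [PySem.List.enumerate_cons, pvEnumerate_shift]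
  cases a <;> simp [List.filter_map, List.map_map, Function.comp_def]

theorem pvAdm_nonneg (p : List Bool) : ∀ x ∈ pvAdm p, 0 ≤ x := by
  induction p with
  | nil => intro x hx; simp [pvAdm] at hx
  | cons a q ih =>
    intro x hx
    rw [pvAdm_cons] at hx
    cases a <;> simp at hx
    · obtain ⟨y, hy, rfl⟩ := hx; have := ih y hy; omega
    · rcases hx with rfl | ⟨y, hy, rfl⟩
      · omega
      · have := ih y hy; omega

theorem pvSeg_shift (xs : List Int) (n : Int) :
    pvSeg (xs.map (· + 1)) (n + 1) = pvSeg xs n := by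
  unfold pvSeg
  have h1 : (xs.map (· + 1)).tail ++ [n + 1] = (xs.tail ++ [n]).map (· + 1) := by
    simp [List.map_tail]
  rw [h1, List.zip_map, List.flatMap_map]
  congr 1
  funext pr
  cases pr with
  | mk x y =>
    have h2 : y + 1 - (x + 1) = y - x := by omega
    simp [Prod.map, h2]

theorem pvAge_eq_pvOut (p : List Bool) : ∀ d : Int, pvAge p d = pvOut p d := by
  induction p with
  | nil =>
    intro d
    have h0 : pvAdm ([] : List Bool) = [] := rfl
    simp only [pvAge, pvOut, h0, List.length_nil, Nat.cast_zero, add_zero]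
    rw [PySem.List.pyRange_one_eq_nil (le_refl _)]
  | cons a q ih =>
    intro d
    have hlen : ((a :: q : List Bool).length : Int) = (q.length : Int) + 1 := by simp
    cases a with
    | true =>
      have hadm : pvAdm (true :: q) = 0 :: (pvAdm q).map (· + 1) := by
        rw [pvAdm_cons]; rfl
      simp only [pvAge, if_true, pvOut, hadm, hlen]
      rw [PySem.List.pyRange_one_eq_nil (by omega : d + 1 + 0 ≤ d + 1)]
      simp only [List.nil_append, ih 0]
      cases hq : pvAdm q with
      | nil =>
        simp only [pvOut, hq, pvSeg, List.map_nil, List.tail_cons, List.nil_append,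
          List.zip_cons_cons, List.zip_nil_left, List.flatMap_cons, List.flatMap_nil,
          List.append_nil, sub_zero]
        rw [PySem.List.pyRange_one_cons (by omega : (0:Int) < (q.length:Int) + 1)]
        have h01 : (0:Int) + 1 = 1 := by omega
        have h1q : (1:Int) + (q.length:Int) = (q.length:Int) + 1 := by omega
        rw [h01, h1q]
      | cons b0 s =>
        have hb0 : 0 ≤ b0 := pvAdm_nonneg q b0 (by rw [hq]; exact List.mem_cons_self)
        have hseg : pvSeg (0 :: (b0 :: s).map (· + 1)) ((q.length : Int) + 1) =
            PySem.List.pyRange 0 (b0 + 1) 1 ++ pvSeg ((b0 :: s).map (· + 1)) ((q.length : Int) + 1) := by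
          simp only [pvSeg, List.map_cons, List.tail_cons, List.cons_append,
            List.zip_cons_cons, List.flatMap_cons, sub_zero]
        rw [hseg, pvSeg_shift]
        simp only [pvOut, hq]
        rw [PySem.List.pyRange_one_cons (by omega : (0:Int) < b0 + 1)]
        simp only [List.cons_append, zero_add]
        rw [show (1:Int) + b0 = b0 + 1 from by omega]
    | false =>
      have hadm : pvAdm (false :: q) = (pvAdm q).map (· + 1) := by
        rw [pvAdm_cons]; rfl
      simp only [pvAge, Bool.false_eq_true, if_false, pvOut, hadm, hlen, ih (d + 1)]
      cases hq : pvAdm q with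
      | nil =>
        simp only [List.map_nil]
        rw [PySem.List.pyRange_one_cons (by omega : d + 1 < d + 1 + ((q.length:Int) + 1))]
        have h2 : d + 1 + ((q.length:Int) + 1) = d + 1 + 1 + (q.length:Int) := by omega
        rw [h2]
      | cons a0 s =>
        have ha0 : 0 ≤ a0 := pvAdm_nonneg q a0 (by rw [hq]; exact List.mem_cons_self)
        simp only [List.map_cons]
        rw [show (a0 + 1) :: s.map (· + 1) = (pvAdm q).map (· + 1) by rw [hq]; rfl,
          pvSeg_shift]
        rw [PySem.List.pyRange_one_cons (by omega : d + 1 < d + 1 + (a0 + 1)),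
          List.cons_append]
        have h2 : d + 1 + (a0 + 1) = d + 1 + 1 + a0 := by omega
        rw [h2, hq]

theorem pvAoiLoop_eq (l : List Bool) : ∀ (t last age : Int),
    age = (if last = -1 then t else t - last - 1) →
    pvAoiLoopA l t last = pvAge l age := by
  induction l with
  | nil => intro t last age _; rfl
  | cons a rest ih =>
    intro t last age h
    cases a with
    | true =>
      simp only [pvAoiLoopA, pvAge, if_true]
      refine congrArg (0 :: ·) ?_
      apply ih
      by_cases ht : t = -1 <;> simp [ht]
    | false =>
      by_cases hl : last = -1
      · simp only [pvAoiLoopA, pvAge, hl, beq_iff_eq, if_true, Bool.false_eq_true,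
          if_false]
        simp only [hl] at h
        refine List.cons_eq_cons.mpr ⟨by omega, ih (t + 1) (-1) (age + 1) (by simp; omega)⟩
      · simp only [pvAoiLoopA, pvAge, beq_iff_eq, hl, Bool.false_eq_true, if_false]
        simp only [hl, if_false] at h
        refine List.cons_eq_cons.mpr ⟨by omega, ih (t + 1) last (age + 1) (by simp [hl]; omega)⟩

theorem pvAlt_eq_pvOut (p : List Bool) : compute_aoi_alt p = pvOut p 0 := by
  unfold compute_aoi_alt pvOut
  cases hq : pvAdm p with
  | nil =>
    simp only
    rw [zero_add, show (1:Int) + (p.length:Int) = (p.length:Int) + 1 from by omega]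
  | cons a0 s =>
    simp only
    rw [PySem.List.foldl_append_eq_flatMap]
    simp only [pvSeg, zero_add]
    rw [show (1:Int) + a0 = a0 + 1 from by omega]

-- ===== VERDICT (by name: the statement is the Claim_ definition above) =====
theorem compute_aoi_spec : Claim_equal_compute_aoi := by
  intro p _
  unfold Spec_compute_aoi compute_aoi
  rw [pvAlt_eq_pvOut, pvAoiLoop_eq p 0 (-1) 0 (by simp), pvAge_eq_pvOut]
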